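-- pv_equiv track=rewrite | github.com/ALe329/Sea_battle | functions_for_sea_battle.py | is_open_sea
-- ===== SOURCE A (Python) =====
-- def is_open_sea(x, y, fleet):
--     koord = []
--     koord_sheep = []
--     for i in range(x - 1, x + 2):
--         for j in range(y - 1, y + 2):
--             koord.append([i, j])
--     for ship in fleet:
--         if ship[2] == True:
--             for n in range(ship[3]):
--                 koord_sheep.append([ship[0], ship[1] + n])
--         else:
--             for h in range(ship[3]):
--                 koord_sheep.append([ship[0] + h, ship[1]])
--     false_true = []
--     for c in koord_sheep:
--         if c in koord:
--             false_true.append(False)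
--         else:
--             false_true.append(True)
--     if False in false_true:
--         return False
--     else:
--         return True
-- ===== SOURCE B (Python) =====
-- def is_open_sea(x, y, fleet):
--     # Interval-overlap test per ship: no neighborhood list, no ship-cell list.
--     for ship in fleet:
--         sx, sy, horiz, ln = ship[0], ship[1], ship[2], ship[3]
--         if horiz == True:
--             if abs(sx - x) <= 1 and ln > 0 and sy <= y + 1 and y - 1 <= sy + ln - 1:
--                 return False
--         else:
--             if abs(sy - y) <= 1 and ln > 0 and sx <= x + 1 and x - 1 <= sx + ln - 1:
--                 return False
--     return True
-- ===== Notes on version B (the rewrite author's own statement) =====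
-- stated objective: faster
-- what changed: B drops the materialized 3x3 neighborhood list, the per-cell ship list and the boolean list entirely; it decides each ship by a constant-time interval-overlap/Chebyshev-distance test and returns False early.
-- outside the precondition, e.g. on is_open_sea(0, 0, [[1, 1, 1]]): A raises IndexError, B raises IndexError
import Mathlib
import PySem

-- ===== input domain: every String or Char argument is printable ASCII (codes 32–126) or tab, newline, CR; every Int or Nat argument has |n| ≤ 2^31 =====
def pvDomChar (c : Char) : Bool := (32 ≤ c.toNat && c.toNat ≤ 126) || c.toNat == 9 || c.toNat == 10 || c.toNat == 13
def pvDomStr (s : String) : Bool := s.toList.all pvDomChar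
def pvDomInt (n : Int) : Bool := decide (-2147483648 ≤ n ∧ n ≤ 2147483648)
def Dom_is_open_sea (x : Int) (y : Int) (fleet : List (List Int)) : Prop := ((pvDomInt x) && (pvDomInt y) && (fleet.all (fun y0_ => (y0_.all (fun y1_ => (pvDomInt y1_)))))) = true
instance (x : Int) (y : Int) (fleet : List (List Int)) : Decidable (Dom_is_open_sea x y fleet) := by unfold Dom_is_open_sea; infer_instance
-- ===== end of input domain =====

-- B replaces A's materialized 3x3 neighborhood list + per-cell ship list + boolean list with a
-- per-ship constant-time interval-overlap test and an early return; equivalence of return values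
-- is proved on fleets whose ships have at least 4 entries (A raises IndexError otherwise).

-- ===== PORT A =====
def is_open_sea (x : Int) (y : Int) (fleet : List (List Int)) : Bool :=
  let koord := (PySem.List.pyRange (x - 1) (x + 2) 1).foldl (fun acc i =>
      (PySem.List.pyRange (y - 1) (y + 2) 1).foldl (fun acc2 j => acc2 ++ [[i, j]]) acc) []
  let koord_sheep := fleet.foldl (fun acc ship =>
      if PySem.List.pyGetD ship 2 0 == 1 then
        (PySem.List.pyRange 0 (PySem.List.pyGetD ship 3 0) 1).foldl
          (fun a n => a ++ [[PySem.List.pyGetD ship 0 0, PySem.List.pyGetD ship 1 0 + n]]) acc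
      else
        (PySem.List.pyRange 0 (PySem.List.pyGetD ship 3 0) 1).foldl
          (fun a h => a ++ [[PySem.List.pyGetD ship 0 0 + h, PySem.List.pyGetD ship 1 0]]) acc) []
  let false_true := koord_sheep.foldl (fun a c => a ++ [if c ∈ koord then false else true]) []
  if false ∈ false_true then false else true

-- ===== PORT B =====
def is_open_sea_alt (x : Int) (y : Int) (fleet : List (List Int)) : Bool :=
  match fleet with
  | [] => true
  | ship :: rest =>
    let sx := PySem.List.pyGetD ship 0 0
    let sy := PySem.List.pyGetD ship 1 0
    let horiz := PySem.List.pyGetD ship 2 0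
    let ln := PySem.List.pyGetD ship 3 0
    if horiz == 1 then
      if |sx - x| ≤ 1 ∧ 0 < ln ∧ sy ≤ y + 1 ∧ y - 1 ≤ sy + ln - 1 then false
      else is_open_sea_alt x y rest
    else
      if |sy - y| ≤ 1 ∧ 0 < ln ∧ sx ≤ x + 1 ∧ x - 1 ≤ sx + ln - 1 then false
      else is_open_sea_alt x y rest

-- ===== PRECONDITION & SPEC =====
-- A indexes ship[0]..ship[3] of every ship, raising IndexError on shorter ships; exactly those inputs are excluded.
def Pre_is_open_sea (x : Int) (y : Int) (fleet : List (List Int)) : Prop :=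
  ∀ ship ∈ fleet, 4 ≤ ship.length
instance (x : Int) (y : Int) (fleet : List (List Int)) : Decidable (Pre_is_open_sea x y fleet) := by unfold Pre_is_open_sea; infer_instance

def pvWitness_is_open_sea : Int × Int × List (List Int) := (3, 3, [[0, 0, 1, 3], [5, 5, 0, 2]])

def Spec_is_open_sea (x : Int) (y : Int) (fleet : List (List Int)) (out : Bool) : Prop := out = is_open_sea_alt x y fleet
instance (x : Int) (y : Int) (fleet : List (List Int)) (out : Bool) : Decidable (Spec_is_open_sea x y fleet out) := by unfold Spec_is_open_sea; infer_instance

-- ===== CLAIM (what is proved, stated in full; the proofs are below) =====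
def Claim_equal_is_open_sea : Prop := ∀ (x : Int) (y : Int) (fleet : List (List Int)), Dom_is_open_sea x y fleet → Pre_is_open_sea x y fleet → Spec_is_open_sea x y fleet (is_open_sea x y fleet)

-- ===== LEMMAS AND PROOFS =====

-- the cells occupied by one ship, as A enumerates them
def shipCells (ship : List Int) : List (List Int) :=
  if PySem.List.pyGetD ship 2 0 == 1 then
    (PySem.List.pyRange 0 (PySem.List.pyGetD ship 3 0) 1).map
      (fun n => [PySem.List.pyGetD ship 0 0, PySem.List.pyGetD ship 1 0 + n])
  else
    (PySem.List.pyRange 0 (PySem.List.pyGetD ship 3 0) 1).map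
      (fun h => [PySem.List.pyGetD ship 0 0 + h, PySem.List.pyGetD ship 1 0])

lemma koord_eq (x y : Int) :
    (PySem.List.pyRange (x - 1) (x + 2) 1).foldl (fun acc i =>
      (PySem.List.pyRange (y - 1) (y + 2) 1).foldl (fun acc2 j => acc2 ++ [[i, j]]) acc) []
    = (PySem.List.pyRange (x - 1) (x + 2) 1).flatMap
        (fun i => (PySem.List.pyRange (y - 1) (y + 2) 1).map (fun j => [i, j])) := by
  simp only [PySem.List.foldl_append_singleton_eq_map]
  rw [PySem.List.foldl_append_eq_flatMap]
  simp

lemma mem_koord (x y a b : Int) :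
    ([a, b] ∈ (PySem.List.pyRange (x - 1) (x + 2) 1).flatMap
        (fun i => (PySem.List.pyRange (y - 1) (y + 2) 1).map (fun j => [i, j])))
      ↔ (x - 1 ≤ a ∧ a < x + 2 ∧ y - 1 ≤ b ∧ b < y + 2) := by
  constructor
  · intro h
    rw [List.mem_flatMap] at h
    obtain ⟨i, hi, h2⟩ := h
    rw [List.mem_map] at h2
    obtain ⟨j, hj, hEq⟩ := h2
    rw [PySem.List.mem_pyRange_one] at hi hj
    obtain ⟨rfl, rfl⟩ : i = a ∧ j = b := by simpa using hEq
    tauto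
  · rintro ⟨h1, h2, h3, h4⟩
    rw [List.mem_flatMap]
    exact ⟨a, by rw [PySem.List.mem_pyRange_one]; exact ⟨h1, h2⟩,
      List.mem_map.mpr ⟨b, by rw [PySem.List.mem_pyRange_one]; exact ⟨h3, h4⟩, rfl⟩⟩

lemma flatten_map_sing {α β : Type} (f : α → β) (l : List α) :
    (l.map (fun x => [f x])).flatten = l.map f := by
  induction l with
  | nil => rfl
  | cons a l ih => simp [ih]

lemma koord_sheep_eq (fleet : List (List Int)) (acc : List (List Int)) :
    fleet.foldl (fun acc ship =>
      if PySem.List.pyGetD ship 2 0 == 1 then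
        (PySem.List.pyRange 0 (PySem.List.pyGetD ship 3 0) 1).foldl
          (fun a n => a ++ [[PySem.List.pyGetD ship 0 0, PySem.List.pyGetD ship 1 0 + n]]) acc
      else
        (PySem.List.pyRange 0 (PySem.List.pyGetD ship 3 0) 1).foldl
          (fun a h => a ++ [[PySem.List.pyGetD ship 0 0 + h, PySem.List.pyGetD ship 1 0]]) acc) acc
    = acc ++ fleet.flatMap shipCells := by
  induction fleet generalizing acc with
  | nil => simp
  | cons ship rest ih =>
    simp only [List.foldl_cons, List.flatMap_cons]
    rw [ih]
    unfold shipCells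
    split <;> simp [PySem.List.foldl_append_singleton_eq_map, flatten_map_sing, List.append_assoc]

-- A returns true iff no ship cell lies in the 3x3 neighborhood
lemma is_open_sea_char (x y : Int) (fleet : List (List Int)) :
    is_open_sea x y fleet
      = decide (∀ c ∈ fleet.flatMap shipCells,
          ¬ (x - 1 ≤ PySem.List.pyGetD c 0 0 ∧ PySem.List.pyGetD c 0 0 < x + 2 ∧
             y - 1 ≤ PySem.List.pyGetD c 1 0 ∧ PySem.List.pyGetD c 1 0 < y + 2)) := by
  unfold is_open_sea
  rw [koord_eq, koord_sheep_eq]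
  simp only [List.nil_append, PySem.List.foldl_append_singleton_eq_map, List.nil_append]
  by_cases h : ∃ c ∈ fleet.flatMap shipCells,
      c ∈ (PySem.List.pyRange (x - 1) (x + 2) 1).flatMap
        (fun i => (PySem.List.pyRange (y - 1) (y + 2) 1).map (fun j => [i, j]))
  · obtain ⟨c, hc, hck⟩ := h
    have hmem : false ∈ (fleet.flatMap shipCells).map
        (fun c => if c ∈ (PySem.List.pyRange (x - 1) (x + 2) 1).flatMap
          (fun i => (PySem.List.pyRange (y - 1) (y + 2) 1).map (fun j => [i, j])) then false else true) := by
      simp only [List.mem_map]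
      exact ⟨c, hc, by simp [hck]⟩
    rw [if_pos hmem]
    -- c is of the form [i, j]
    obtain ⟨i, _, j, _, rfl⟩ := by
      simpa [List.mem_flatMap, List.mem_map] using hck
    have := (mem_koord x y i j).mp hck
    symm; simp only [decide_eq_false_iff_not, Classical.not_forall]
    push_neg
    exact ⟨[i, j], hc, by simpa [PySem.List.pyGetD] using this⟩
  · push_neg at h
    have hmem : false ∉ (fleet.flatMap shipCells).map
        (fun c => if c ∈ (PySem.List.pyRange (x - 1) (x + 2) 1).flatMap
          (fun i => (PySem.List.pyRange (y - 1) (y + 2) 1).map (fun j => [i, j])) then false else true) := by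
      simp only [List.mem_map, not_exists, not_and]
      intro c hc
      simp [h c hc]
    rw [if_neg hmem]
    symm; rw [decide_eq_true_iff]
    intro c hc hb
    apply h c hc
    -- every cell produced by shipCells has the form [i, j]
    have hform : ∃ i j, c = [i, j] := by
      simp only [List.mem_flatMap] at hc
      obtain ⟨ship, _, hcs⟩ := hc
      unfold shipCells at hcs
      split at hcs <;> rw [List.mem_map] at hcs <;> obtain ⟨n, _, rfl⟩ := hcs <;> exact ⟨_, _, rfl⟩
    obtain ⟨i, j, rfl⟩ := hform
    rw [mem_koord]
    simpa [PySem.List.pyGetD] using hb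

-- per-ship: B's arithmetic test is exactly "some cell of this ship hits the neighborhood"
lemma hit_iff_h (x y sx sy ln : Int) :
    (|sx - x| ≤ 1 ∧ 0 < ln ∧ sy ≤ y + 1 ∧ y - 1 ≤ sy + ln - 1)
      ↔ ∃ n, (0 ≤ n ∧ n < ln) ∧
          (x - 1 ≤ sx ∧ sx < x + 2 ∧ y - 1 ≤ sy + n ∧ sy + n < y + 2) := by
  rw [abs_le]
  constructor
  · rintro ⟨⟨ha, hb⟩, hl, h1, h2⟩
    exact ⟨max (y - 1) sy - sy, by constructor <;> constructor <;> omega⟩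
  · rintro ⟨n, ⟨h0, hn⟩, h1, h2, h3, h4⟩
    refine ⟨by omega, by omega, by omega, by omega⟩

lemma hit_iff_v (x y sx sy ln : Int) :
    (|sy - y| ≤ 1 ∧ 0 < ln ∧ sx ≤ x + 1 ∧ x - 1 ≤ sx + ln - 1)
      ↔ ∃ n, (0 ≤ n ∧ n < ln) ∧
          (x - 1 ≤ sx + n ∧ sx + n < x + 2 ∧ y - 1 ≤ sy ∧ sy < y + 2) := by
  rw [abs_le]
  constructor
  · rintro ⟨⟨ha, hb⟩, hl, h1, h2⟩
    exact ⟨max (x - 1) sx - sx, by constructor <;> constructor <;> omega⟩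
  · rintro ⟨n, ⟨h0, hn⟩, h1, h2, h3, h4⟩
    refine ⟨by omega, by omega, by omega, by omega⟩

lemma alt_char (x y : Int) (fleet : List (List Int)) :
    is_open_sea_alt x y fleet
      = decide (∀ c ∈ fleet.flatMap shipCells,
          ¬ (x - 1 ≤ PySem.List.pyGetD c 0 0 ∧ PySem.List.pyGetD c 0 0 < x + 2 ∧
             y - 1 ≤ PySem.List.pyGetD c 1 0 ∧ PySem.List.pyGetD c 1 0 < y + 2)) := by
  induction fleet with
  | nil => simp [is_open_sea_alt]
  | cons ship rest ih =>
    rw [is_open_sea_alt]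
    simp only [List.flatMap_cons]
    have hcells : (∃ c ∈ shipCells ship,
        (x - 1 ≤ PySem.List.pyGetD c 0 0 ∧ PySem.List.pyGetD c 0 0 < x + 2 ∧
         y - 1 ≤ PySem.List.pyGetD c 1 0 ∧ PySem.List.pyGetD c 1 0 < y + 2))
        ↔ (if PySem.List.pyGetD ship 2 0 == 1 then
            (|PySem.List.pyGetD ship 0 0 - x| ≤ 1 ∧ 0 < PySem.List.pyGetD ship 3 0 ∧
             PySem.List.pyGetD ship 1 0 ≤ y + 1 ∧
             y - 1 ≤ PySem.List.pyGetD ship 1 0 + PySem.List.pyGetD ship 3 0 - 1)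
          else
            (|PySem.List.pyGetD ship 1 0 - y| ≤ 1 ∧ 0 < PySem.List.pyGetD ship 3 0 ∧
             PySem.List.pyGetD ship 0 0 ≤ x + 1 ∧
             x - 1 ≤ PySem.List.pyGetD ship 0 0 + PySem.List.pyGetD ship 3 0 - 1)) := by
      unfold shipCells
      split
      · rw [hit_iff_h]
        simp only [List.mem_map, PySem.List.mem_pyRange_one]
        constructor
        · rintro ⟨c, ⟨n, hn, rfl⟩, hb⟩
          exact ⟨n, hn, by simpa [PySem.List.pyGetD] using hb⟩
        · rintro ⟨n, hn, hb⟩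
          exact ⟨_, ⟨n, hn, rfl⟩, by simpa [PySem.List.pyGetD] using hb⟩
      · rw [hit_iff_v]
        simp only [List.mem_map, PySem.List.mem_pyRange_one]
        constructor
        · rintro ⟨c, ⟨n, hn, rfl⟩, hb⟩
          exact ⟨n, hn, by simpa [PySem.List.pyGetD] using hb⟩
        · rintro ⟨n, hn, hb⟩
          exact ⟨_, ⟨n, hn, rfl⟩, by simpa [PySem.List.pyGetD] using hb⟩
    by_cases hh : PySem.List.pyGetD ship 2 0 == 1 <;>
      simp only [hh, if_true, if_false, Bool.false_eq_true] at hcells ⊢ <;>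
      split <;> rename_i hcond
    · symm; simp only [decide_eq_false_iff_not, Classical.not_forall]
      push_neg
      obtain ⟨c, hc, hb⟩ := hcells.mpr (by
        rcases hcond with ⟨a1, a2, a3, a4⟩
        exact ⟨a1, a2, a3, by omega⟩)
      exact ⟨c, List.mem_append_left _ hc, hb⟩
    · rw [ih, decide_eq_decide]
      constructor
      · intro h c hc hb
        rcases List.mem_append.mp hc with hc | hc
        · exact hcond (by
            rcases hcells.mp ⟨c, hc, hb⟩ with ⟨a1, a2, a3, a4⟩
            exact ⟨a1, a2, a3, by omega⟩)
        · exact h c hc hb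
      · intro h c hc
        exact h c (List.mem_append_right _ hc)
    · symm; simp only [decide_eq_false_iff_not, Classical.not_forall]
      push_neg
      obtain ⟨c, hc, hb⟩ := hcells.mpr (by
        rcases hcond with ⟨a1, a2, a3, a4⟩
        exact ⟨a1, a2, a3, by omega⟩)
      exact ⟨c, List.mem_append_left _ hc, hb⟩
    · rw [ih, decide_eq_decide]
      constructor
      · intro h c hc hb
        rcases List.mem_append.mp hc with hc | hc
        · exact hcond (by
            rcases hcells.mp ⟨c, hc, hb⟩ with ⟨a1, a2, a3, a4⟩
            exact ⟨a1, a2, a3, by omega⟩)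
        · exact h c hc hb
      · intro h c hc
        exact h c (List.mem_append_right _ hc)

-- ===== VERDICT (by name: the statement is the Claim_ definition above) =====
theorem is_open_sea_spec : Claim_equal_is_open_sea := by
  intro x y fleet _ _
  unfold Spec_is_open_sea
  rw [is_open_sea_char, alt_char]
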